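-- pv_equiv track=rewrite | github.com/HackXIt/REIL-hex-game | src/reil_hex_game/agents/rule_based_v1_agent.py | create_double_threat
-- ===== SOURCE A (Python) =====
-- HEX_NEIGHBORS = [(-1, 0), (-1, 1), (0, -1), (0, 1), (1, -1), (1, 0)]
--
-- def get_neighbors(i, j, size):
--     return [
--         (i+di, j+dj)
--         for di, dj in HEX_NEIGHBORS
--         if 0 <= i+di < size and 0 <= j+dj < size
--     ]
--
-- def create_double_threat(board, action_set, player):
--     # Tries moves that connect to two of own clusters
--     size = len(board)
--     clusters = []
--     visited = set()
--     for i in range(size):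
--         for j in range(size):
--             if board[i][j] == player and (i, j) not in visited:
--                 cluster = []
--                 stack = [(i, j)]
--                 while stack:
--                     ci, cj = stack.pop()
--                     if (ci, cj) in visited:
--                         continue
--                     visited.add((ci, cj))
--                     cluster.append((ci, cj))
--                     for ni, nj in get_neighbors(ci, cj, size):
--                         if board[ni][nj] == player:
--                             stack.append((ni, nj))
--                 clusters.append(cluster)
--     for i, j in action_set:
--         count = 0
--         for cluster in clusters:
--             if any((ni, nj) in cluster for ni, nj in get_neighbors(i, j, size)):
--                 count += 1
--         if count >= 2:
--             return (i, j)
--     return None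
-- ===== SOURCE B (Python) =====
-- def _nbrs(c, size):
--     out = []
--     for di, dj in ((-1, 0), (-1, 1), (0, -1), (0, 1), (1, -1), (1, 0)):
--         if 0 <= c[0] + di < size and 0 <= c[1] + dj < size:
--             out.append((c[0] + di, c[1] + dj))
--     return out
--
-- def create_double_threat(board, action_set, player):
--     # One-pass flood fill labels every own stone with a cluster id; each
--     # candidate move then only inspects the labels of its <= 6 neighbours.
--     size = len(board)
--     comp = {}
--     cid = 0
--     for i in range(size):
--         for j in range(size):
--             if board[i][j] == player and (i, j) not in comp:
--                 todo = [(i, j)]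
--                 while todo:
--                     c = todo.pop()
--                     if c in comp:
--                         continue
--                     comp[c] = cid
--                     grow = [n for n in _nbrs(c, size) if board[n[0]][n[1]] == player]
--                     todo.extend(grow)
--                 cid += 1
--     for i, j in action_set:
--         seen = set()
--         for n in _nbrs((i, j), size):
--             if n in comp:
--                 seen.add(comp[n])
--         if len(seen) >= 2:
--             return (i, j)
--     return None
-- ===== Notes on version B (the rewrite author's own statement) =====
-- stated objective: alternative
-- what changed: Instead of keeping clusters as lists and scanning every cluster list for each candidate move, B labels each own stone with a cluster id in one dict during the flood fill, so each move only looks up the labels of its at most six neighbours and counts the distinct ids.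
import Mathlib
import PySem

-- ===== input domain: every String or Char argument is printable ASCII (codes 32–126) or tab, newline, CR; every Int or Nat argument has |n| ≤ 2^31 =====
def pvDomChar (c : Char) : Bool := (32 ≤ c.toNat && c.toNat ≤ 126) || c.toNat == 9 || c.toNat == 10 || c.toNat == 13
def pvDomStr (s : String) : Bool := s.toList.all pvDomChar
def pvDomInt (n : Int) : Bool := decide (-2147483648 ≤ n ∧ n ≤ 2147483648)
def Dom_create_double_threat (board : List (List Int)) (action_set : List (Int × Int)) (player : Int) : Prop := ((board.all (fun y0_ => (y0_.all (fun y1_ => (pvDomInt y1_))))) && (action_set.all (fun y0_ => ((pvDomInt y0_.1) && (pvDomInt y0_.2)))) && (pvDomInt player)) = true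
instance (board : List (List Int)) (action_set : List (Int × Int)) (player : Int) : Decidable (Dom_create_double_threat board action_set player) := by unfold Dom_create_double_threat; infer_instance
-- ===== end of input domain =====

-- B replaces A's per-move scan over all cluster lists by a one-pass cell→cluster-id labelling,
-- so each candidate move only inspects the labels of its (at most six) neighbours.

-- ===== PORT A =====
def hexNeighbors : List (Int × Int) := [(-1, 0), (-1, 1), (0, -1), (0, 1), (1, -1), (1, 0)]

def getNeighbors (i j size : Int) : List (Int × Int) :=
  hexNeighbors.filterMap (fun d =>
    if 0 ≤ i + d.1 ∧ i + d.1 < size ∧ 0 ≤ j + d.2 ∧ j + d.2 < size then some (i + d.1, j + d.2) else none)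

-- board[c.1][c.2]; exact under Pre_ for the in-range indices both algorithms use
def cellVal (board : List (List Int)) (c : Int × Int) : Int :=
  PySem.List.pyGetD (PySem.List.pyGetD board c.1 []) c.2 0

def inRange (size : Int) (c : Int × Int) : Prop := 0 ≤ c.1 ∧ c.1 < size ∧ 0 ≤ c.2 ∧ c.2 < size

-- in-range cells, the universe used by the termination measure of A's DFS loop
def allCells (size : Int) : List (Int × Int) :=
  (PySem.List.pyRange 0 size 1).flatMap (fun i => (PySem.List.pyRange 0 size 1).map (fun j => (i, j)))

theorem mem_allCells (size : Int) (c : Int × Int) : c ∈ allCells size ↔ inRange size c := by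
  simp only [allCells, inRange, List.mem_flatMap, List.mem_map, PySem.List.mem_pyRange_one]
  constructor
  · rintro ⟨i, hi, j, hj, rfl⟩; exact ⟨hi.1, hi.2, hj.1, hj.2⟩
  · rintro ⟨h1, h2, h3, h4⟩; exact ⟨c.1, ⟨h1, h2⟩, c.2, ⟨h3, h4⟩, Prod.mk.eta⟩

theorem mem_getNeighbors (i j size : Int) (n : Int × Int) (h : n ∈ getNeighbors i j size) :
    inRange size n := by
  simp only [getNeighbors, List.mem_filterMap] at h
  obtain ⟨d, _, hd⟩ := h
  split at hd
  · cases hd; assumption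
  · cases hd


theorem length_filter_le_of_imp {α : Type} (l : List α) (p q : α → Bool)
    (himp : ∀ x, q x = true → p x = true) :
    (l.filter q).length ≤ (l.filter p).length := by
  induction l with
  | nil => simp
  | cons a l ih =>
    rw [List.filter_cons, List.filter_cons]
    cases hq : q a with
    | true => simp only [himp a hq, if_true, List.length_cons]; omega
    | false =>
      simp only [Bool.false_eq_true, if_false]
      cases hp : p a with
      | true => simp only [if_true, List.length_cons]; omega
      | false => simp only [Bool.false_eq_true, if_false]; exact ih

theorem length_filter_lt_of_imp {α : Type} (l : List α) (p q : α → Bool)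
    (himp : ∀ x, q x = true → p x = true) (c : α) (hc : c ∈ l) (hpc : p c = true) (hqc : q c = false) :
    (l.filter q).length < (l.filter p).length := by
  induction l with
  | nil => cases hc
  | cons a l ih =>
    rw [List.filter_cons, List.filter_cons]
    rcases List.mem_cons.1 hc with h | h
    · subst h
      simp only [hpc, hqc, if_true, Bool.false_eq_true, if_false, List.length_cons]
      exact Nat.lt_succ_of_le (length_filter_le_of_imp l p q himp)
    · cases hq : q a with
      | true =>
        simp only [himp a hq, if_true, List.length_cons]
        exact Nat.succ_lt_succ (ih h)
      | false =>
        simp only [Bool.false_eq_true, if_false]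
        cases hp : p a with
        | true =>
          simp only [if_true, List.length_cons]
          exact Nat.lt_succ_of_lt (ih h)
        | false => simp only [Bool.false_eq_true, if_false]; exact ih h


theorem mem_foldl_cons {α : Type} (l : List α) (acc : List α) (x : α) :
    x ∈ l.foldl (fun s n => n :: s) acc ↔ x ∈ l ∨ x ∈ acc := by
  induction l generalizing acc with
  | nil => simp
  | cons a l ih =>
    simp only [List.foldl_cons, ih, List.mem_cons]
    tauto

theorem set_contains_iff {α : Type} [BEq α] [LawfulBEq α] (s : PySem.Set α) (x : α) :
    PySem.Set.contains s x = true ↔ x ∈ s := by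
  simp [PySem.Set.contains]

theorem contains_add_of_contains {α : Type} [BEq α] [LawfulBEq α] (s : PySem.Set α) (x y : α)
    (h : PySem.Set.contains s x = true) : PySem.Set.contains (PySem.Set.add s y) x = true :=
  (set_contains_iff _ _).2 ((PySem.Set.mem_add s y x).2 (Or.inl ((set_contains_iff _ _).1 h)))

theorem bounds_push (size : Int) (ns rest : List (Int × Int))
    (hns : ∀ y ∈ ns, inRange size y) (hrest : ∀ z ∈ rest, inRange size z) :
    ∀ x ∈ ns.foldl (fun s n => n :: s) rest, inRange size x := by
  intro x hx
  rcases (mem_foldl_cons ns rest x).1 hx with h | h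
  · exact hns x h
  · exact hrest x h

theorem visited_filter_dec (size : Int) (visited : PySem.Set (Int × Int)) (c : Int × Int)
    (hc : c ∈ allCells size) (hv : PySem.Set.contains visited c = false) :
    ((allCells size).filter (fun x => !PySem.Set.contains (PySem.Set.add visited c) x)).length
      < ((allCells size).filter (fun x => !PySem.Set.contains visited x)).length := by
  refine length_filter_lt_of_imp _ _ _ ?_ c hc ?_ ?_
  · intro x hx
    cases hvx : PySem.Set.contains visited x with
    | false => rfl
    | true =>
      rw [contains_add_of_contains visited x c hvx] at hx
      simp at hx
  · simp only [hv, Bool.not_false]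
  · simp

-- the while-loop of A: pop from the end of the Python stack = head of this list
def dfsA (board : List (List Int)) (player size : Int)
    (stack : List (Int × Int)) (visited : PySem.Set (Int × Int)) (cluster : List (Int × Int))
    (hs : ∀ c ∈ stack, inRange size c) :
    PySem.Set (Int × Int) × List (Int × Int) :=
  match stack with
  | [] => (visited, cluster)
  | c :: rest =>
    if hv : PySem.Set.contains visited c = true then
      dfsA board player size rest visited cluster (fun x hx => hs x (List.mem_cons_of_mem _ hx))
    else
      let ns := (getNeighbors c.1 c.2 size).filter (fun n => cellVal board n == player)
      dfsA board player size (ns.foldl (fun s n => n :: s) rest)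
        (PySem.Set.add visited c) (cluster ++ [c])
        (bounds_push size ns rest
          (fun y hy => mem_getNeighbors _ _ _ _ (List.mem_of_mem_filter hy))
          (fun z hz => hs z (List.mem_cons_of_mem _ hz)))
  termination_by (((allCells size).filter (fun x => !PySem.Set.contains visited x)).length, stack.length)
  decreasing_by
  · exact Prod.Lex.right _ (Nat.lt_succ_self _)
  · exact Prod.Lex.left _ _ (visited_filter_dec size visited c
      ((mem_allCells size c).2 (hs c List.mem_cons_self)) (eq_false_of_ne_true hv))

-- the clustering phase of A (nested for-loops); state = (clusters, visited)
def clustersA (board : List (List Int)) (player size : Int) :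
    List (List (Int × Int)) × PySem.Set (Int × Int) :=
  (PySem.List.pyRange 0 size 1).attach.foldl (fun st i =>
    (PySem.List.pyRange 0 size 1).attach.foldl (fun st j =>
      if cellVal board (i.1, j.1) == player && ! PySem.Set.contains st.2 (i.1, j.1) then
        let r := dfsA board player size [(i.1, j.1)] st.2 []
          (by
            intro c hc
            rcases List.mem_singleton.1 hc with h
            subst h
            have h1 := PySem.List.mem_pyRange_one.1 i.2
            have h2 := PySem.List.mem_pyRange_one.1 j.2
            exact ⟨h1.1, h1.2, h2.1, h2.2⟩)
        (st.1 ++ [r.2], r.1)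
      else st) st) ([], PySem.Set.empty)

-- the per-move count of A
def countClusters (size : Int) (clusters : List (List (Int × Int))) (a : Int × Int) : Int :=
  clusters.foldl (fun n cl => if (getNeighbors a.1 a.2 size).any (fun nb => cl.contains nb) then n + 1 else n) 0

def actLoopA (size : Int) (clusters : List (List (Int × Int))) : List (Int × Int) → Option (Int × Int)
  | [] => none
  | a :: rest => if countClusters size clusters a ≥ 2 then some a else actLoopA size clusters rest

def create_double_threat (board : List (List Int)) (action_set : List (Int × Int)) (player : Int) : Option (Int × Int) :=
  let size : Int := board.length
  actLoopA size (clustersA board player size).1 action_set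

-- ===== PORT B =====
-- Source B builds each cell's neighbour list with an append loop over the inline offset tuples
def nbrsB (size : Int) (c : Int × Int) : List (Int × Int) :=
  ([(-1, 0), (-1, 1), (0, -1), (0, 1), (1, -1), (1, 0)] : List (Int × Int)).foldl
    (fun out d =>
      if 0 ≤ c.1 + d.1 ∧ c.1 + d.1 < size ∧ 0 ≤ c.2 + d.2 ∧ c.2 + d.2 < size then
        out ++ [(c.1 + d.1, c.2 + d.2)]
      else out) []

-- board[n[0]][n[1]] as Source B reads it
def atB (board : List (List Int)) (c : Int × Int) : Int :=
  Option.getD (PySem.List.pyGet? (Option.getD (PySem.List.pyGet? board c.1) []) c.2) 0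


theorem dict_size_dec (cap : Nat) (comp : PySem.Dict (Int × Int) Int) (c : Int × Int) (cid : Int)
    (hsz : comp.size < cap) (hc : comp.contains c = false) :
    cap - (comp.insert c cid).size < cap - comp.size := by
  rw [PySem.Dict.size_insert, if_neg (by simp [hc])]
  omega

-- Source B's while-loop: todo.pop() is the head here; grow is reversed when it lands on top
def dfsB (board : List (List Int)) (player size : Int) (cap : Nat) (cid : Int)
    (comp : PySem.Dict (Int × Int) Int) (todo : List (Int × Int)) : PySem.Dict (Int × Int) Int :=
  match todo with
  | [] => comp
  | c :: rest =>
    if hcv : comp.contains c = true then dfsB board player size cap cid comp rest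
    else if hsz : comp.size < cap then
      dfsB board player size cap cid (comp.insert c cid)
        (((nbrsB size c).filter (fun n => atB board n == player)).reverse ++ rest)
    else comp  -- never reached: comp holds distinct in-range cells, fewer than cap = size²
  termination_by (cap - comp.size, todo.length)
  decreasing_by
  · exact Prod.Lex.right _ (Nat.lt_succ_self _)
  · exact Prod.Lex.left _ _ (dict_size_dec cap comp c cid hsz
      (eq_false_of_ne_true hcv))

-- the cells (i, j) of the nested range loops, flattened
def cellsB (size : Int) : List (Int × Int) :=
  (List.range size.toNat).flatMap (fun (a : Nat) => (List.range size.toNat).map (fun (b : Nat) => ((a : Int), (b : Int))))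

-- one cell of the labelling pass; state = (next id, labels so far)
def labelStep (board : List (List Int)) (player size : Int)
    (st : Int × PySem.Dict (Int × Int) Int) (c : Int × Int) : Int × PySem.Dict (Int × Int) Int :=
  if atB board c == player && ! st.2.contains c then
    (st.1 + 1, dfsB board player size (size.toNat * size.toNat) st.1 st.2 [c])
  else st

def labelsB (board : List (List Int)) (player : Int) (size : Int) : Int × PySem.Dict (Int × Int) Int :=
  (cellsB size).foldl (labelStep board player size) (0, PySem.Dict.empty)

-- the move scan: collect the distinct labels next to the move
def scanB (size : Int) (comp : PySem.Dict (Int × Int) Int) : List (Int × Int) → Option (Int × Int)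
  | [] => none
  | a :: rest =>
    if PySem.Set.len ((nbrsB size a).foldl
        (fun s n => if comp.contains n then PySem.Set.add s (comp.getD n 0) else s)
        PySem.Set.empty) ≥ 2
    then some a
    else scanB size comp rest

def create_double_threat_alt (board : List (List Int)) (action_set : List (Int × Int)) (player : Int) : Option (Int × Int) :=
  let size : Int := board.length
  scanB size (labelsB board player size).2 action_set

-- ===== PRECONDITION & SPEC =====
-- Pre_ excludes exactly the boards with a row shorter than the board (A raises IndexError there).
def Pre_create_double_threat (board : List (List Int)) (action_set : List (Int × Int)) (player : Int) : Prop :=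
  ∀ row ∈ board, board.length ≤ row.length
instance (board : List (List Int)) (action_set : List (Int × Int)) (player : Int) : Decidable (Pre_create_double_threat board action_set player) := by unfold Pre_create_double_threat; infer_instance

def pvWitness_create_double_threat : List (List Int) × (List (Int × Int)) × Int :=
  ([[1, 0], [0, 1]], ([(0, 1), (1, 0)], 1))

def Spec_create_double_threat (board : List (List Int)) (action_set : List (Int × Int)) (player : Int) (out : Option (Int × Int)) : Prop := out = create_double_threat_alt board action_set player
instance (board : List (List Int)) (action_set : List (Int × Int)) (player : Int) (out : Option (Int × Int)) : Decidable (Spec_create_double_threat board action_set player out) := by unfold Spec_create_double_threat; infer_instance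

-- ===== CLAIM (what is proved, stated in full; the proofs are below) =====
def Claim_equal_create_double_threat : Prop := ∀ (board : List (List Int)) (action_set : List (Int × Int)) (player : Int), Dom_create_double_threat board action_set player → Pre_create_double_threat board action_set player → Spec_create_double_threat board action_set player (create_double_threat board action_set player)

-- ===== LEMMAS AND PROOFS =====


-- B's board read and neighbour list coincide with A's
theorem atB_eq (board : List (List Int)) (c : Int × Int) : atB board c = cellVal board c := rfl

theorem nbrs_eq (size : Int) (c : Int × Int) : nbrsB size c = getNeighbors c.1 c.2 size := by
  simp only [nbrsB, getNeighbors, hexNeighbors, List.foldl, List.filterMap]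
  split_ifs <;> rfl

theorem foldl_cons_rev {α : Type} : ∀ (l rest : List α),
    l.reverse ++ rest = l.foldl (fun s n => n :: s) rest
  | [], _ => rfl
  | a :: l, rest => by
    rw [List.foldl_cons, ← foldl_cons_rev l (a :: rest), List.reverse_cons, List.append_assoc]
    rfl

theorem comp_size_eq_keys_length {ν : Type} (d : PySem.Dict (Int × Int) ν) :
    d.keys.length = d.size := by
  simp [PySem.Dict.keys, PySem.Dict.size]

theorem allCells_length (size : Int) : (allCells size).length = size.toNat * size.toNat := by
  simp [allCells, List.length_flatMap, PySem.List.length_pyRange_one, List.map_const',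
    List.sum_replicate, smul_eq_mul]

theorem nodup_length_le_allCells (size : Int) (l : List (Int × Int))
    (hnd : l.Nodup) (hsub : ∀ x ∈ l, inRange size x) :
    l.length ≤ (allCells size).length := by
  classical
  have h1 : l.toFinset.card = l.length := List.toFinset_card_of_nodup hnd
  have h2 : l.toFinset ⊆ (allCells size).toFinset := by
    intro x hx
    rw [List.mem_toFinset] at hx ⊢
    exact (mem_allCells size x).2 (hsub x hx)
  have h3 := Finset.card_le_card h2
  have h4 := List.toFinset_card_le (allCells size)
  omega

-- the two flood fills, run in lock step: A's visited set is B's key set,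
-- A's fresh cluster is the set of cells B labels cid
theorem dfs_par (board : List (List Int)) (player size : Int) (cap : Nat)
    (hcap : (allCells size).length ≤ cap)
    (stack : List (Int × Int)) (visited : PySem.Set (Int × Int)) (cluster : List (Int × Int))
    (hs : ∀ c ∈ stack, inRange size c) :
    ∀ (comp : PySem.Dict (Int × Int) Int) (cid : Int),
      comp.keys.Nodup →
      (∀ k ∈ comp.keys, inRange size k) →
      (∀ x, PySem.Set.contains visited x = comp.contains x) →
      (∀ x, cluster.contains x = (comp.get? x == some cid)) →
      (∀ x, PySem.Set.contains (dfsA board player size stack visited cluster hs).1 x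
            = (dfsB board player size cap cid comp stack).contains x)
      ∧ (∀ x, ((dfsA board player size stack visited cluster hs).2.contains x)
            = ((dfsB board player size cap cid comp stack).get? x == some cid))
      ∧ (∀ x, (dfsB board player size cap cid comp stack).get? x = comp.get? x
             ∨ (comp.get? x = none ∧ (dfsB board player size cap cid comp stack).get? x = some cid))
      ∧ (dfsB board player size cap cid comp stack).keys.Nodup
      ∧ (∀ k ∈ (dfsB board player size cap cid comp stack).keys, inRange size k) := by
  induction stack, visited, cluster, hs using dfsA.induct board player size with
  | case1 visited cluster hs _ =>
    intro comp cid hnd hkin h1 h2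
    rw [dfsA, dfsB]
    exact ⟨h1, h2, fun x => Or.inl rfl, hnd, hkin⟩
  | case2 visited cluster c rest hs hv _ ih =>
    intro comp cid hnd hkin h1 h2
    have hvB : comp.contains c = true := by rw [← h1]; exact hv
    rw [dfsA, dfsB]
    simp only [hv, hvB, dif_pos]
    exact ih comp cid hnd hkin h1 h2
  | case3 visited cluster c rest hs hv ns _ ih =>
    intro comp cid hnd hkin h1 h2
    have hvB : comp.contains c = false := by rw [← h1]; simpa using hv
    have hcr : inRange size c := hs c List.mem_cons_self
    have hnone : PySem.Dict.get? comp c = none :=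
      (PySem.Dict.get?_eq_none_iff_contains comp c).2 hvB
    have hguard : comp.size < cap := by
      have hnodc : (c :: comp.keys).Nodup := by
        refine List.nodup_cons.2 ⟨fun hm => ?_, hnd⟩
        rw [← PySem.Dict.contains_iff_mem_keys] at hm
        rw [hm] at hvB; cases hvB
      have hsubc : ∀ x ∈ c :: comp.keys, inRange size x := by
        intro x hx
        rcases List.mem_cons.1 hx with h | h
        · subst h; exact hcr
        · exact hkin x h
      have := nodup_length_le_allCells size _ hnodc hsubc
      have hk := comp_size_eq_keys_length comp
      simp only [List.length_cons] at this
      omega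
    have hstack : ((nbrsB size c).filter (fun n => atB board n == player)).reverse ++ rest
        = ((getNeighbors c.1 c.2 size).filter (fun n => cellVal board n == player)).foldl
            (fun s n => n :: s) rest := by
      rw [nbrs_eq, foldl_cons_rev]
      rfl
    rw [dfsA, dfsB]
    simp only [hv, dif_neg, not_false_iff, hvB, Bool.false_eq_true, hguard, dif_pos]
    rw [hstack]
    have h1' : ∀ x, PySem.Set.contains (visited.add c) x = (comp.insert c cid).contains x := by
      intro x
      rw [PySem.Dict.contains_insert]
      by_cases hx : x = c
      · subst hx
        simp
      · have hbx : (x == c) = false := by simpa using hx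
        have : PySem.Set.contains (visited.add c) x = PySem.Set.contains visited x := by
          cases hvx : PySem.Set.contains visited x with
          | true => exact contains_add_of_contains visited x c hvx
          | false =>
            cases hvx' : PySem.Set.contains (visited.add c) x with
            | false => rfl
            | true =>
              exfalso
              rcases (PySem.Set.mem_add visited c x).1 ((set_contains_iff _ _).1 hvx') with hm | hm
              · rw [(set_contains_iff _ _).2 hm] at hvx; cases hvx
              · exact hx hm
        rw [this, hbx, h1 x, Bool.false_or]
    have h2' : ∀ x, (cluster ++ [c]).contains x = ((comp.insert c cid).get? x == some cid) := by
      intro x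
      by_cases hx : x = c
      · subst hx
        rw [PySem.Dict.get?_insert_self]
        simp
      · rw [PySem.Dict.get?_insert_of_ne comp cid hx]
        rw [← h2 x]
        simp [hx]
    have hnd' : (comp.insert c cid).keys.Nodup := PySem.Dict.nodup_keys_insert comp c cid hnd
    have hkin' : ∀ k ∈ (comp.insert c cid).keys, inRange size k := by
      intro k hk
      rw [PySem.Dict.keys_insert_of_not_contains comp cid hvB] at hk
      rcases List.mem_append.1 hk with h | h
      · exact hkin k h
      · rcases List.mem_singleton.1 h with rfl; exact hcr
    obtain ⟨g1, g2, g3, g4, g5⟩ := ih (comp.insert c cid) cid hnd' hkin' h1' h2'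
    refine ⟨g1, g2, fun x => ?_, g4, g5⟩
    rcases g3 x with hg | ⟨hg1, hg2⟩
    · by_cases hx : x = c
      · subst hx
        rw [PySem.Dict.get?_insert_self] at hg
        exact Or.inr ⟨hnone, hg⟩
      · rw [PySem.Dict.get?_insert_of_ne comp cid hx] at hg
        exact Or.inl hg
    · by_cases hx : x = c
      · subst hx
        rw [PySem.Dict.get?_insert_self] at hg1
        cases hg1
      · rw [PySem.Dict.get?_insert_of_ne comp cid hx] at hg1
        exact Or.inr ⟨hg1, hg2⟩

theorem foldl_rel {α σ τ : Type} (l : List α) (fA : σ → α → σ) (fB : τ → α → τ) (R : σ → τ → Prop)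
    (h : ∀ s t a, R s t → R (fA s a) (fB t a)) :
    ∀ s0 t0, R s0 t0 → R (l.foldl fA s0) (l.foldl fB t0) := by
  induction l with
  | nil => intro s0 t0 h0; exact h0
  | cons a l ih => intro s0 t0 h0; exact ih (fA s0 a) (fB t0 a) (h s0 t0 a h0)

-- the relation maintained between A's (clusters, visited) and B's (next id, labels)
def RelST (size : Int) (stA : List (List (Int × Int)) × PySem.Set (Int × Int))
    (stB : Int × PySem.Dict (Int × Int) Int) : Prop :=
  stB.1 = (stA.1.length : Int) ∧
  stB.2.keys.Nodup ∧
  (∀ k ∈ stB.2.keys, inRange size k) ∧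
  (∀ x, PySem.Set.contains stA.2 x = stB.2.contains x) ∧
  (∀ (m : Nat), m < stA.1.length → ∀ x, ((stA.1[m]!).contains x) = (stB.2.get? x == some (m : Int))) ∧
  (∀ x v, stB.2.get? x = some v → 0 ≤ v ∧ v < stB.1)

theorem relst_step (board : List (List Int)) (player size : Int)
    (st : List (List (Int × Int)) × PySem.Set (Int × Int)) (stB : Int × PySem.Dict (Int × Int) Int)
    (i j : Int) (hR : RelST size st stB)
    (prfA : ∀ c ∈ [(i, j)], inRange size c) :
    RelST size
      (if cellVal board (i, j) == player && ! PySem.Set.contains st.2 (i, j) then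
        ((st.1 ++ [(dfsA board player size [(i, j)] st.2 [] prfA).2],
          (dfsA board player size [(i, j)] st.2 [] prfA).1) : List (List (Int × Int)) × PySem.Set (Int × Int))
      else st)
      (labelStep board player size stB (i, j)) := by
  obtain ⟨hlen, hnd, hkin, h1, hidx, hbound⟩ := hR
  unfold labelStep
  rw [atB_eq, ← h1 (i, j)]
  by_cases hcond : (cellVal board (i, j) == player && ! PySem.Set.contains st.2 (i, j)) = true
  · rw [if_pos hcond, if_pos hcond]
    have h2 : ∀ x, (([] : List (Int × Int)).contains x) = (stB.2.get? x == some stB.1) := by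
      intro x
      cases hg : PySem.Dict.get? stB.2 x with
      | none => rfl
      | some v =>
        have hv := (hbound x v hg).2
        have : v ≠ stB.1 := by omega
        simp [this]
    have hcap : (allCells size).length ≤ size.toNat * size.toNat := by
      rw [allCells_length]
    obtain ⟨g1, g2, g3, g4, g5⟩ :=
      dfs_par board player size (size.toNat * size.toNat) hcap [(i, j)] st.2 [] prfA stB.2 stB.1 hnd hkin h1 h2
    refine ⟨?_, g4, g5, g1, ?_, ?_⟩
    · simp only [List.length_append, List.length_cons, List.length_nil]
      push_cast
      omega
    · intro m hm x
      simp only [List.length_append, List.length_singleton] at hm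
      by_cases hmlt : m < st.1.length
      · have e1 : (st.1 ++ [(dfsA board player size [(i, j)] st.2 [] prfA).2])[m]! = st.1[m]! := by
          rw [List.getElem!_eq_getElem?_getD, List.getElem!_eq_getElem?_getD,
            List.getElem?_append_left hmlt]
        rw [e1, hidx m hmlt x]
        have hmne : (m : Int) ≠ stB.1 := by
          rw [hlen]; intro h; rw [Int.natCast_inj.1 h] at hmlt; omega
        rcases g3 x with hg | ⟨hg1, hg2⟩
        · rw [hg]
        · rw [hg1, hg2]
          have h1' : ((none : Option Int) == some (m : Int)) = false := rfl
          have h2' : ((some stB.1 : Option Int) == some (m : Int)) = false := by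
            simpa using fun h => hmne h.symm
          rw [h1', h2']
      · have hmeq : m = st.1.length := by omega
        subst hmeq
        have e1 : (st.1 ++ [(dfsA board player size [(i, j)] st.2 [] prfA).2])[st.1.length]!
            = (dfsA board player size [(i, j)] st.2 [] prfA).2 := by
          rw [List.getElem!_eq_getElem?_getD, List.getElem?_concat_length]
          rfl
        rw [e1, g2 x, ← hlen]
    · intro x v hg
      rcases g3 x with hg' | ⟨_, hg'⟩
      · rw [hg'] at hg
        have := hbound x v hg
        omega
      · rw [hg'] at hg
        cases hg
        omega
  · rw [if_neg hcond, if_neg hcond]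
    exact ⟨hlen, hnd, hkin, h1, hidx, hbound⟩

theorem cellsB_eq (size : Int) : cellsB size = allCells size := by
  unfold cellsB allCells
  rw [PySem.List.pyRange_one, List.flatMap_map]
  simp only [List.map_map, Function.comp_def, Int.sub_zero, zero_add]

theorem foldl_attach_map {α β : Type} (l : List α) (f : β → α → β) :
    ∀ (la : List {x // x ∈ l}) (b : β),
      la.foldl (fun acc t => f acc t.1) b = (la.map Subtype.val).foldl f b := by
  intro la
  induction la with
  | nil => intro b; rfl
  | cons a la ih => intro b; simp only [List.foldl_cons, List.map_cons, ih]

theorem foldl_attach_eq {α β : Type} (l : List α) (f : β → α → β) (b : β) :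
    l.attach.foldl (fun acc t => f acc t.1) b = l.foldl f b := by
  rw [foldl_attach_map l f l.attach b, List.attach_map_subtype_val]

theorem labelsB_eq_nested (board : List (List Int)) (player size : Int) :
    (PySem.List.pyRange 0 size 1).attach.foldl (fun st i =>
      (PySem.List.pyRange 0 size 1).attach.foldl (fun st j =>
        labelStep board player size st (i.1, j.1)) st) (0, PySem.Dict.empty)
    = labelsB board player size := by
  have inner : ∀ (ii : Int) (st : Int × PySem.Dict (Int × Int) Int),
      (PySem.List.pyRange 0 size 1).attach.foldl
        (fun st j => labelStep board player size st (ii, j.1)) st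
      = (PySem.List.pyRange 0 size 1).foldl
        (fun st j => labelStep board player size st (ii, j)) st :=
    fun ii st => foldl_attach_eq (PySem.List.pyRange 0 size 1)
      (fun st j => labelStep board player size st (ii, j)) st
  rw [foldl_attach_eq (PySem.List.pyRange 0 size 1)
    (fun st (i : Int) => (PySem.List.pyRange 0 size 1).attach.foldl
      (fun st j => labelStep board player size st (i, j.1)) st)]
  simp only [inner]
  unfold labelsB
  rw [cellsB_eq]
  unfold allCells
  rw [List.foldl_flatMap]
  simp only [List.foldl_map]

theorem clusters_comp (board : List (List Int)) (player size : Int) :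
    RelST size (clustersA board player size) (labelsB board player size) := by
  rw [← labelsB_eq_nested]
  unfold clustersA
  apply foldl_rel _ _ _ (RelST size)
  · intro s t i hst
    apply foldl_rel _ _ _ (RelST size)
    · intro s' t' j hst'
      exact relst_step board player size s' t' i.1 j.1 hst' _
    · exact hst
  · exact ⟨rfl, by simp [PySem.Dict.empty, PySem.Dict.keys], by simp [PySem.Dict.empty, PySem.Dict.keys],
      fun x => rfl, fun m hm x => by simp at hm, fun x v hg => by simp [PySem.Dict.get?_empty] at hg⟩

theorem countP_clusters (ns : List (Int × Int)) (comp : PySem.Dict (Int × Int) Int) :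
    ∀ (cls : List (List (Int × Int))) (base : Int),
    (∀ (m : Nat), m < cls.length → ∀ x, ((cls[m]!).contains x) = (PySem.Dict.get? comp x == some (base + m))) →
    cls.countP (fun cl => ns.any (fun nb => cl.contains nb))
      = (PySem.List.pyRange base (base + cls.length) 1).countP (fun v => ns.any (fun nb => comp.get? nb == some v)) := by
  intro cls
  induction cls with
  | nil =>
    intro base _
    rw [PySem.List.pyRange_one_eq_nil (by simp)]
    rfl
  | cons cl rest ih =>
    intro base H
    have hcons : PySem.List.pyRange base (base + ((cl :: rest).length : Int)) 1
        = base :: PySem.List.pyRange (base + 1) ((base + 1) + (rest.length : Int)) 1 := by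
      have e : base + (((cl :: rest).length : Nat) : Int) = (base + 1) + (rest.length : Int) := by
        simp only [List.length_cons]; push_cast; ring
      rw [e, PySem.List.pyRange_one_cons (by omega : base < (base + 1) + (rest.length : Int))]
    rw [hcons]
    rw [List.countP_cons, List.countP_cons]
    have hhead : (ns.any (fun nb => cl.contains nb)) = (ns.any (fun nb => comp.get? nb == some base)) := by
      congr 1
      funext nb
      have := H 0 (by simp) nb
      simpa using this
    have htail : rest.countP (fun cl => ns.any (fun nb => cl.contains nb))
        = (PySem.List.pyRange (base + 1) ((base + 1) + (rest.length : Int)) 1).countP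
            (fun v => ns.any (fun nb => comp.get? nb == some v)) := by
      apply ih (base + 1)
      intro m hm x
      have := H (m + 1) (by simp; omega) x
      have e1 : ((cl :: rest)[m + 1]!) = rest[m]! := by
        rw [List.getElem!_eq_getElem?_getD, List.getElem!_eq_getElem?_getD]
        rfl
      rw [e1] at this
      rw [this]
      congr 2
      push_cast
      ring
    rw [hhead, htail]

theorem countP_range_eq_len (K : Int) (vals : List Int)
    (hb : ∀ v ∈ vals, 0 ≤ v ∧ v < K) :
    (PySem.List.pyRange 0 K 1).countP (fun v => decide (v ∈ vals))
      = (PySem.Set.ofList vals : List Int).length := by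
  have hnodupR : (PySem.List.pyRange 0 K 1).Nodup := PySem.List.nodup_pyRange_one 0 K
  have hnodupV : (PySem.Set.ofList vals : List Int).Nodup := PySem.Set.nodup_ofList vals
  rw [List.countP_eq_length_filter]
  have hnodupF : ((PySem.List.pyRange 0 K 1).filter (fun v => decide (v ∈ vals))).Nodup :=
    hnodupR.filter _
  rw [← List.toFinset_card_of_nodup hnodupF, ← List.toFinset_card_of_nodup hnodupV]
  congr 1
  apply Finset.ext
  intro v
  simp only [List.mem_toFinset, List.mem_filter, PySem.List.mem_pyRange_one, decide_eq_true_eq,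
    PySem.Set.mem_ofList]
  constructor
  · rintro ⟨_, hv⟩; exact hv
  · intro hv; exact ⟨⟨(hb v hv).1, (hb v hv).2⟩, hv⟩

theorem count_eq (size : Int) (clusters : List (List (Int × Int))) (comp : PySem.Dict (Int × Int) Int) (cid : Int)
    (hlen : cid = (clusters.length : Int))
    (hidx : ∀ (m : Nat), m < clusters.length → ∀ x, ((clusters[m]!).contains x) = (PySem.Dict.get? comp x == some (m : Int)))
    (hbound : ∀ x v, PySem.Dict.get? comp x = some v → 0 ≤ v ∧ v < cid)
    (a : Int × Int) :
    countClusters size clusters a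
      = PySem.Set.len (PySem.Set.ofList ((getNeighbors a.1 a.2 size).filterMap (fun n => comp.get? n))) := by
  set ns := getNeighbors a.1 a.2 size with hns
  set vals := ns.filterMap (fun n => comp.get? n) with hvals
  have hc1 : countClusters size clusters a
      = ((clusters.countP (fun cl => ns.any (fun nb => cl.contains nb)) : Nat) : Int) := by
    unfold countClusters
    rw [PySem.List.foldl_count_if]
    rw [← hns]
    omega
  have hc2 := countP_clusters ns comp clusters 0 (by
    intro m hm x
    rw [hidx m hm x]
    congr 2
    omega)
  have hrange : PySem.List.pyRange 0 (0 + (clusters.length : Int)) 1 = PySem.List.pyRange 0 (clusters.length : Int) 1 := by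
    norm_num
  have hc3 : (PySem.List.pyRange 0 (clusters.length : Int) 1).countP (fun v => ns.any (fun nb => comp.get? nb == some v))
      = (PySem.List.pyRange 0 (clusters.length : Int) 1).countP (fun v => decide (v ∈ vals)) := by
    apply List.countP_congr
    intro v _
    simp only [List.any_eq_true, decide_eq_true_eq, hvals, List.mem_filterMap, beq_iff_eq]
  have hbounds : ∀ v ∈ vals, 0 ≤ v ∧ v < (clusters.length : Int) := by
    intro v hv
    rw [hvals] at hv
    obtain ⟨nb, _, hg⟩ := List.mem_filterMap.1 hv
    have := hbound nb v hg
    omega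
  have hc4 := countP_range_eq_len (clusters.length : Int) vals hbounds
  rw [hc1, hc2, hrange, hc3, hc4]
  rfl

-- Source B's seen-set loop collects exactly comp's values along the neighbour list
theorem seen_fold_eq (comp : PySem.Dict (Int × Int) Int) :
    ∀ (l : List (Int × Int)) (s : PySem.Set Int),
    l.foldl (fun s n => if comp.contains n then PySem.Set.add s (comp.getD n 0) else s) s
      = PySem.Set.update s (l.filterMap (fun n => comp.get? n)) := by
  intro l
  induction l with
  | nil => intro s; rfl
  | cons n l ih =>
    intro s
    rw [List.foldl_cons, List.filterMap_cons]
    cases hg : PySem.Dict.get? comp n with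
    | none =>
      have hc : comp.contains n = false := (PySem.Dict.get?_eq_none_iff_contains comp n).1 hg
      simp only [hc, Bool.false_eq_true, if_false]
      exact ih s
    | some v =>
      have hc : comp.contains n = true := by
        rw [PySem.Dict.contains_eq_isSome_get?, hg]; rfl
      have hd : comp.getD n 0 = v := PySem.Dict.getD_of_get?_eq_some comp 0 hg
      simp only [hc, if_true, hd, PySem.Set.update_cons]
      exact ih (s.add v)

theorem scan_eq (size : Int) (clusters : List (List (Int × Int))) (comp : PySem.Dict (Int × Int) Int)
    (h : ∀ a : Int × Int, countClusters size clusters a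
        = PySem.Set.len (PySem.Set.ofList ((getNeighbors a.1 a.2 size).filterMap (fun n => comp.get? n)))) :
    ∀ l : List (Int × Int), actLoopA size clusters l = scanB size comp l := by
  intro l
  induction l with
  | nil => rfl
  | cons a rest ih =>
    rw [actLoopA, scanB]
    have hseen : (nbrsB size a).foldl
        (fun s n => if comp.contains n then PySem.Set.add s (comp.getD n 0) else s) PySem.Set.empty
        = PySem.Set.ofList ((getNeighbors a.1 a.2 size).filterMap (fun n => comp.get? n)) := by
      rw [seen_fold_eq, nbrs_eq]
      exact PySem.Set.update_nil_left _
    rw [hseen, ← h a, ih]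

-- ===== VERDICT (by name: the statement is the Claim_ definition above) =====
theorem create_double_threat_spec : Claim_equal_create_double_threat := by
  intro board action_set player _ _
  unfold Spec_create_double_threat create_double_threat create_double_threat_alt
  obtain ⟨hlen, _, _, _, hidx, hbound⟩ := clusters_comp board player (board.length : Int)
  exact scan_eq _ _ _ (count_eq _ _ _ _ hlen hidx hbound) action_set
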